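-- pv_equiv track=rewrite | github.com/xiaotai-yang/tai_surf | ED/old/2dTFIM_ED.py | ABC
-- ===== SOURCE A (Python) =====
-- def ABC(L):
--     B = {}
--     A = {0}
--     C = {}
--     for i in range (1, L):
--         B[i] = [i+j*(L-1) for j in range(i+1)]
--     for i in range (L, 2*L-2):
--         B[i] = [(i-L+1)*L+j*(L-1) for j in range(1, 2*L-i)]
--     for i in B:
--         if i!=1:
--             B[i]+=B[i-1]
--             B[i].sort()
--     for i in B:
--         C[i] = set(range(L**2))-set(B[i])-A
--     return A, B, C
--
-- L = 4
-- ===== SOURCE B (Python) =====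
-- def _merge(xs, ys):
--     out = []
--     i = j = 0
--     while i < len(xs) and j < len(ys):
--         if xs[i] <= ys[j]:
--             out.append(xs[i]); i += 1
--         else:
--             out.append(ys[j]); j += 1
--     out.extend(xs[i:])
--     out.extend(ys[j:])
--     return out
--
--
-- def ABC(L):
--     A = {0}
--     B = {}
--     C = {}
--     if L < 2:
--         return A, B, C
--     remaining = set(range(L**2)) - A
--     prev = []
--     for i in range(1, 2*L - 2):
--         if i < L:
--             base = [i + j*(L-1) for j in range(i+1)]
--         else:
--             base = [(i-L+1)*L + j*(L-1) for j in range(1, 2*L-i)]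
--         cur = _merge(base, prev)
--         B[i] = cur
--         remaining = remaining - set(base)
--         C[i] = remaining
--         prev = cur
--     return A, B, C
-- ===== Notes on version B (the rewrite author's own statement) =====
-- stated objective: alternative
-- what changed: B builds the cumulative index lists by merging each new pre-sorted arithmetic-progression list into the previous sorted accumulation instead of concatenating and re-sorting, and derives each complement set C[i] incrementally from the previous one instead of recomputing set(range(L**2))-set(B[i]) from scratch, all in one loop.
import Mathlib
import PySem

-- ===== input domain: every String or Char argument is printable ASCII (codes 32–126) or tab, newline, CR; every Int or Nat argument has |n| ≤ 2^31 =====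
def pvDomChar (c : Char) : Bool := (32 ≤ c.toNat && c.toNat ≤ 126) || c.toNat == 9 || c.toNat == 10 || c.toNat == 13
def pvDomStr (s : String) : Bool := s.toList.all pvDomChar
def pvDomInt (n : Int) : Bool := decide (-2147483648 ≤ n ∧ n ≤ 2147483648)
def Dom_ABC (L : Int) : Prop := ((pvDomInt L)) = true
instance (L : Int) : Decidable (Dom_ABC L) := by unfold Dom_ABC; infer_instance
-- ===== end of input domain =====

-- B replaces A's per-key re-sort of the accumulated index list by a merge of the
-- two pre-sorted lists and builds each complement set C[i] incrementally from the
-- previous one instead of from scratch (objective: alternative algorithm).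

-- ===== PORT A =====
def ABC (L : Int) : List Int × (List (Int × List Int)) × (List (Int × List Int)) :=
  let A : PySem.Set Int := PySem.Set.ofList [0]
  let B1 : PySem.Dict Int (List Int) :=
    (PySem.List.pyRange 1 L).foldl
      (fun B i => B.insert i ((PySem.List.pyRange 0 (i+1)).map (fun j => i + j*(L-1))))
      PySem.Dict.empty
  let B2 :=
    (PySem.List.pyRange L (2*L-2)).foldl
      (fun B i => B.insert i ((PySem.List.pyRange 1 (2*L-i)).map (fun j => (i-L+1)*L + j*(L-1))))
      B1
  let B3 :=
    B2.keys.foldl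
      (fun B i =>
        if i ≠ 1 then
          B.insert i (PySem.List.sorted (B.getD i [] ++ B.getD (i-1) []) (fun x => x))
        else B)
      B2
  let C1 :=
    B3.keys.foldl
      (fun C i =>
        C.insert i (PySem.Set.diff
          (PySem.Set.diff (PySem.Set.ofList (PySem.List.pyRange 0 (L^2)))
            (PySem.Set.ofList (B3.getD i []))) A))
      PySem.Dict.empty
  (A, B3.items, C1.items)

-- ===== PORT B =====
-- hand-written merge of two sorted lists (Source B's _merge)
def pvMerge : List Int → List Int → List Int
  | [], ys => ys
  | x::xs, [] => x::xs
  | x::xs, y::ys => if x ≤ y then x :: pvMerge xs (y::ys) else y :: pvMerge (x::xs) ys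
termination_by xs ys => xs.length + ys.length

-- Source B's inline `if i < L: base = … else: base = …`
def pvBase (L i : Int) : List Int :=
  if i < L then (PySem.List.pyRange 0 (i+1)).map (fun j => i + j*(L-1))
  else (PySem.List.pyRange 1 (2*L-i)).map (fun j => (i-L+1)*L + j*(L-1))

def ABC_alt (L : Int) : List Int × (List (Int × List Int)) × (List (Int × List Int)) :=
  let A : PySem.Set Int := PySem.Set.ofList [0]
  -- degenerate grids produce no keys; return before building the L² range set
  if L < 2 then (A, (PySem.Dict.empty : PySem.Dict Int (List Int)).items,
    (PySem.Dict.empty : PySem.Dict Int (List Int)).items)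
  else
  let s :=
    (PySem.List.pyRange 1 (2*L-2)).foldl
      (fun (s : PySem.Dict Int (List Int) × PySem.Dict Int (List Int) × PySem.Set Int × List Int) i =>
        let base := pvBase L i
        let cur := pvMerge base s.2.2.2
        let remaining := PySem.Set.diff s.2.2.1 (PySem.Set.ofList base)
        (s.1.insert i cur, s.2.1.insert i remaining, remaining, cur))
      (PySem.Dict.empty, PySem.Dict.empty,
        PySem.Set.diff (PySem.Set.ofList (PySem.List.pyRange 0 (L^2))) A, [])
  (A, s.1.items, s.2.1.items)

-- ===== PRECONDITION & SPEC =====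
def Spec_ABC (L : Int) (out : List Int × (List (Int × List Int)) × (List (Int × List Int))) : Prop := out = ABC_alt L
instance (L : Int) (out : List Int × (List (Int × List Int)) × (List (Int × List Int))) : Decidable (Spec_ABC L out) := by unfold Spec_ABC; infer_instance

-- ===== CLAIM (what is proved, stated in full; the proofs are below) =====
def Claim_equal_ABC : Prop := ∀ (L : Int), Dom_ABC L → Spec_ABC L (ABC L)

-- ===== LEMMAS AND PROOFS =====

-- A's accumulated list for key i = 1 + k : sort-based recursion
def pvAccA (L : Int) : Nat → List Int
  | 0 => pvBase L 1
  | k+1 => PySem.List.sorted (pvBase L ((k : Int)+2) ++ pvAccA L k) (fun x => x)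

-- B's accumulated list for key i = 1 + k : merge-based recursion
def pvAccB (L : Int) : Nat → List Int
  | 0 => pvBase L 1
  | k+1 => pvMerge (pvBase L ((k : Int)+2)) (pvAccB L k)

-- B's remaining complement set after processing key k
def pvRem (L : Int) : Nat → List Int
  | 0 => PySem.Set.diff (PySem.Set.ofList (PySem.List.pyRange 0 (L^2))) (PySem.Set.ofList [0])
  | k+1 => PySem.Set.diff (pvRem L k) (PySem.Set.ofList (pvBase L ((k : Int)+1)))

def pvAccI (L i : Int) : List Int := pvAccA L (i-1).toNat

-- A's C-value for key i
def pvCA (L i : Int) : List Int :=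
  PySem.Set.diff
    (PySem.Set.diff (PySem.Set.ofList (PySem.List.pyRange 0 (L^2)))
      (PySem.Set.ofList (pvAccI L i))) (PySem.Set.ofList [0])

theorem pvMerge_nil_right (xs : List Int) : pvMerge xs [] = xs := by
  cases xs <;> simp [pvMerge]

theorem pvMerge_eq_merge (xs ys : List Int) :
    pvMerge xs ys = xs.merge ys (fun a b => decide (a ≤ b)) := by
  fun_induction pvMerge xs ys with
  | case1 ys => simp
  | case2 x xs => simp
  | case3 x xs y ys h ih => simp [h, ih]
  | case4 x xs y ys h ih => simp [h, ih]

theorem pvMerge_perm (xs ys : List Int) : (pvMerge xs ys).Perm (xs ++ ys) := by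
  rw [pvMerge_eq_merge]; exact List.merge_perm_append _

theorem pvMerge_pairwise (xs ys : List Int)
    (hx : xs.Pairwise (· ≤ ·)) (hy : ys.Pairwise (· ≤ ·)) :
    (pvMerge xs ys).Pairwise (· ≤ ·) := by
  rw [pvMerge_eq_merge]
  have h := List.pairwise_merge (le := fun a b : Int => decide (a ≤ b))
    (fun a b c hab hbc => by
      simp only [decide_eq_true_eq] at *; exact le_trans hab hbc)
    (fun a b => by simpa using le_total a b) xs ys
    (by simpa using hx) (by simpa using hy)
  simpa using h

theorem pvBase_pairwise (L : Int) (hL : 2 ≤ L) (i : Int) :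
    (pvBase L i).Pairwise (· ≤ ·) := by
  unfold pvBase
  split <;>
  · refine List.Pairwise.map _ ?_ (PySem.List.pairwise_lt_pyRange_one _ _)
    intro a b hab
    have h1 : a * (L-1) ≤ b * (L-1) := by
      apply mul_le_mul_of_nonneg_right (by omega) (by omega)
    omega

theorem pvAccA_pairwise (L : Int) (hL : 2 ≤ L) (k : Nat) :
    (pvAccA L k).Pairwise (· ≤ ·) := by
  cases k with
  | zero => exact pvBase_pairwise L hL 1
  | succ k => simpa [pvAccA] using (PySem.List.sorted_pairwise
      (pvBase L ((k : Int)+2) ++ pvAccA L k) (fun x => x))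

theorem pvAccB_eq_accA (L : Int) (hL : 2 ≤ L) (k : Nat) : pvAccB L k = pvAccA L k := by
  induction k with
  | zero => rfl
  | succ k ih =>
    have hperm := pvMerge_perm (pvBase L ((k : Int)+2)) (pvAccA L k)
    have hpw := pvMerge_pairwise (pvBase L ((k : Int)+2)) (pvAccA L k)
      (pvBase_pairwise L hL _) (pvAccA_pairwise L hL k)
    show pvMerge (pvBase L ((k : Int)+2)) (pvAccB L k) = _
    rw [ih]
    exact (PySem.List.sorted_id_eq_of_perm_of_pairwise
      (pvBase L ((k : Int)+2) ++ pvAccA L k)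
      (pvMerge (pvBase L ((k : Int)+2)) (pvAccA L k)) hperm hpw).symm

theorem pvRem_filter (L : Int) (k : Nat) :
    pvRem L (k+1) = (PySem.Set.ofList (PySem.List.pyRange 0 (L^2))).filter
      (fun x => !(pvAccA L k).contains x && !((PySem.Set.ofList [0] : List Int).contains x)) := by
  induction k with
  | zero =>
    show PySem.Set.diff (PySem.Set.diff _ _) (PySem.Set.ofList (pvBase L ((0:Nat)+1))) = _
    simp only [PySem.Set.diff, List.filter_filter]
    apply List.filter_congr
    intro x _
    rw [Bool.eq_iff_iff]
    simp [PySem.Set.contains, List.contains_eq_mem, PySem.Set.mem_ofList, pvAccA]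
  | succ k ih =>
    show PySem.Set.diff (pvRem L (k+1)) (PySem.Set.ofList (pvBase L (((k+1):Nat)+1))) = _
    rw [ih]
    simp only [PySem.Set.diff, List.filter_filter]
    apply List.filter_congr
    intro x _
    have e : (((k+1):Nat):Int) + 1 = (k:Int)+2 := by push_cast; ring
    rw [Bool.eq_iff_iff, e]
    simp only [Bool.and_eq_true, Bool.not_eq_true', PySem.Set.contains, List.contains_eq_mem,
      PySem.Set.mem_ofList, decide_eq_false_iff_not, pvAccA, PySem.List.mem_sorted,
      List.mem_append]
    tauto

theorem pvCA_eq_pvRem (L i : Int) (hi : 1 ≤ i) : pvCA L i = pvRem L i.toNat := by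
  have e : i.toNat = (i-1).toNat + 1 := by omega
  rw [e, pvRem_filter]
  unfold pvCA pvAccI
  simp only [PySem.Set.diff, List.filter_filter]
  apply List.filter_congr
  intro x _
  rw [Bool.eq_iff_iff]
  simp only [Bool.and_eq_true, Bool.not_eq_true', PySem.Set.contains, List.contains_eq_mem,
    PySem.Set.mem_ofList, decide_eq_false_iff_not]
  tauto

-- stage 1+2 : after A's first two loops the dict maps i to pvBase L i
theorem stageAB (L : Int) (hL : 2 ≤ L) :
    ((PySem.List.pyRange L (2*L-2)).foldl
      (fun B i => B.insert i ((PySem.List.pyRange 1 (2*L-i)).map (fun j => (i-L+1)*L + j*(L-1))))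
      ((PySem.List.pyRange 1 L).foldl
        (fun B i => B.insert i ((PySem.List.pyRange 0 (i+1)).map (fun j => i + j*(L-1))))
        PySem.Dict.empty)).items
    = (PySem.List.pyRange 1 (2*L-2)).map (fun i => (i, pvBase L i)) := by
  have h1 := PySem.Dict.items_foldl_insert_fresh (PySem.List.pyRange 1 L)
    (fun i => i) (fun i => (PySem.List.pyRange 0 (i+1)).map (fun j => i + j*(L-1)))
    PySem.Dict.empty (by intro a _; simp) (by simpa using PySem.List.nodup_pyRange_one 1 L)
  have hkeys1 : ((PySem.List.pyRange 1 L).foldl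
      (fun B i => B.insert i ((PySem.List.pyRange 0 (i+1)).map (fun j => i + j*(L-1))))
      PySem.Dict.empty).keys = PySem.Set.ofList (PySem.List.pyRange 1 L) := by
    rw [PySem.Dict.keys_foldl_insert (PySem.List.pyRange 1 L)
      (fun _ i => (PySem.List.pyRange 0 (i+1)).map (fun j => i + j*(L-1)))]
    simp [PySem.Set.update_nil_left]
  have h2 := PySem.Dict.items_foldl_insert_fresh (PySem.List.pyRange L (2*L-2))
    (fun i => i) (fun i => (PySem.List.pyRange 1 (2*L-i)).map (fun j => (i-L+1)*L + j*(L-1)))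
    ((PySem.List.pyRange 1 L).foldl
      (fun B i => B.insert i ((PySem.List.pyRange 0 (i+1)).map (fun j => i + j*(L-1))))
      PySem.Dict.empty)
    (by
      intro a ha
      have ha' := (PySem.List.mem_pyRange_one).mp ha
      rw [← Bool.not_eq_true, PySem.Dict.contains_iff_mem_keys, hkeys1]
      simp only [PySem.Set.mem_ofList, PySem.List.mem_pyRange_one]
      omega)
    (by simpa using PySem.List.nodup_pyRange_one L (2*L-2))
  rw [h2, h1]
  rw [PySem.List.pyRange_one_append 1 L (2*L-2) (by omega) (by omega), List.map_append]
  simp only [PySem.Dict.empty, List.nil_append]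
  congr 1
  · apply List.map_congr_left
    intro i hi
    have hi' := (PySem.List.mem_pyRange_one).mp hi
    rw [pvBase, if_pos (by omega)]
  · apply List.map_congr_left
    intro i hi
    have hi' := (PySem.List.mem_pyRange_one).mp hi
    rw [pvBase, if_neg (by omega)]

-- stage 3 : the accumulate-and-sort loop, prefix invariant
theorem stage3 (L : Int) (hL : 2 ≤ L)
    (d2 : PySem.Dict Int (List Int))
    (hd2 : d2.items = (PySem.List.pyRange 1 (2*L-2)).map (fun i => (i, pvBase L i))) :
    ∀ m : Int, 1 ≤ m → m ≤ 2*L-2 →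
    ((PySem.List.pyRange 1 m).foldl
      (fun B i =>
        if i ≠ 1 then
          B.insert i (PySem.List.sorted (B.getD i [] ++ B.getD (i-1) []) (fun x => x))
        else B) d2).items
    = (PySem.List.pyRange 1 m).map (fun i => (i, pvAccI L i))
      ++ (PySem.List.pyRange m (2*L-2)).map (fun i => (i, pvBase L i)) := by
  intro m hm
  induction m, hm using Int.le_induction with
  | base =>
    intro _
    rw [PySem.List.pyRange_one_eq_nil (le_refl 1)]
    simpa using hd2
  | succ m hm1 ih =>
    intro hub
    have hm2 : m ≤ 2*L-2 := by omega
    have ihs := ih hm2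
    rw [PySem.List.pyRange_one_succ_right hm1, List.foldl_append, List.foldl_cons,
      List.foldl_nil]
    set D := (PySem.List.pyRange 1 m).foldl
      (fun B i =>
        if i ≠ 1 then
          B.insert i (PySem.List.sorted (B.getD i [] ++ B.getD (i-1) []) (fun x => x))
        else B) d2 with hDdef
    have hkeys : D.keys = PySem.List.pyRange 1 (2*L-2) := by
      simp only [PySem.Dict.keys, ihs, List.map_append, List.map_map]
      simp only [Function.comp_def, List.map_id']
      rw [← PySem.List.pyRange_one_append 1 m (2*L-2) (by omega) hm2]
    have hnd : D.keys.Nodup := by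
      rw [hkeys]; exact PySem.List.nodup_pyRange_one _ _
    by_cases hm1' : m = 1
    · subst hm1'
      rw [if_neg (by simp)]
      rw [ihs, PySem.List.pyRange_one_eq_nil (le_refl 1),
        PySem.List.pyRange_one_cons (by omega : (1:Int) < 2*L-2)]
      have e : pvAccI L 1 = pvBase L 1 := by norm_num [pvAccI, pvAccA]
      simp [e]
    · rw [if_pos hm1']
      have hmem_m : (m, pvBase L m) ∈ D.items := by
        rw [ihs]
        exact List.mem_append_right _
          (List.mem_map_of_mem (PySem.List.mem_pyRange_one.mpr ⟨le_refl m, by omega⟩))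
      have hgm := PySem.Dict.getD_of_mem_items D hmem_m hnd []
      have hmem_m1 : (m-1, pvAccI L (m-1)) ∈ D.items := by
        rw [ihs]
        exact List.mem_append_left _
          (List.mem_map_of_mem (PySem.List.mem_pyRange_one.mpr ⟨by omega, by omega⟩))
      have hgm1 := PySem.Dict.getD_of_mem_items D hmem_m1 hnd []
      rw [hgm, hgm1]
      have hv : PySem.List.sorted (pvBase L m ++ pvAccI L (m-1)) (fun x => x) = pvAccI L m := by
        have e1 : pvAccI L (m-1) = pvAccA L (m-2).toNat := by
          unfold pvAccI; congr 1; omega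
        have e2 : (m-1).toNat = (m-2).toNat + 1 := by omega
        have e3 : (((m-2).toNat : Int)) + 2 = m := by omega
        rw [e1]
        unfold pvAccI
        rw [e2]
        conv_rhs => rw [pvAccA]
        rw [e3]
      rw [hv]
      have hcont : D.contains m = true := by
        rw [PySem.Dict.contains_iff_mem_keys, hkeys]
        exact PySem.List.mem_pyRange_one.mpr ⟨by omega, by omega⟩
      rw [PySem.Dict.items_insert_of_contains D _ hcont, ihs, List.map_append]
      rw [PySem.List.pyRange_one_cons (by omega : m < 2*L-2)]
      rw [List.map_cons, List.map_cons]
      have hleft : (List.map (fun i => (i, pvAccI L i)) (PySem.List.pyRange 1 m)).map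
          (fun p => if p.1 == m then (m, pvAccI L m) else p)
          = List.map (fun i => (i, pvAccI L i)) (PySem.List.pyRange 1 m) := by
        rw [List.map_map]
        apply List.map_congr_left
        intro i hi
        have hi' := (PySem.List.mem_pyRange_one).mp hi
        simp [show i ≠ m by omega]
      have hright : (List.map (fun i => (i, pvBase L i)) (PySem.List.pyRange (m+1) (2*L-2))).map
          (fun p => if p.1 == m then (m, pvAccI L m) else p)
          = List.map (fun i => (i, pvBase L i)) (PySem.List.pyRange (m+1) (2*L-2)) := by
        rw [List.map_map]
        apply List.map_congr_left
        intro i hi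
        have hi' := (PySem.List.mem_pyRange_one).mp hi
        simp [show i ≠ m by omega]
      rw [List.map_append, hleft, List.map_cons, hright]
      simp

-- stage 4 : the C loop over the final dict
theorem stage4 (L : Int)
    (d3 : PySem.Dict Int (List Int))
    (hd3 : d3.items = (PySem.List.pyRange 1 (2*L-2)).map (fun i => (i, pvAccI L i))) :
    (d3.keys.foldl
      (fun C i =>
        C.insert i (PySem.Set.diff
          (PySem.Set.diff (PySem.Set.ofList (PySem.List.pyRange 0 (L^2)))
            (PySem.Set.ofList (d3.getD i []))) (PySem.Set.ofList [0])))
      PySem.Dict.empty).items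
    = (PySem.List.pyRange 1 (2*L-2)).map (fun i => (i, pvCA L i)) := by
  have hkeys : d3.keys = PySem.List.pyRange 1 (2*L-2) := by
    simp only [PySem.Dict.keys, hd3, List.map_map]
    simp [Function.comp_def]
  have hnd : d3.keys.Nodup := by
    rw [hkeys]; exact PySem.List.nodup_pyRange_one _ _
  rw [hkeys]
  rw [PySem.Dict.items_foldl_insert_fresh (PySem.List.pyRange 1 (2*L-2))
    (fun i => i)
    (fun i => PySem.Set.diff
      (PySem.Set.diff (PySem.Set.ofList (PySem.List.pyRange 0 (L^2)))
        (PySem.Set.ofList (d3.getD i []))) (PySem.Set.ofList [0]))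
    PySem.Dict.empty (by intro a _; simp)
    (by simpa using PySem.List.nodup_pyRange_one 1 (2*L-2))]
  simp only [PySem.Dict.empty, List.nil_append]
  apply List.map_congr_left
  intro i hi
  have hg : d3.getD i [] = pvAccI L i := by
    apply PySem.Dict.getD_of_mem_items d3 _ hnd
    rw [hd3]
    exact List.mem_map_of_mem hi
  simp only [hg, pvCA]

-- B's single loop, prefix invariant
theorem altloop (L : Int) :
    ∀ m : Int, 1 ≤ m → m ≤ 2*L-2 →
    ((PySem.List.pyRange 1 m).foldl
      (fun (s : PySem.Dict Int (List Int) × PySem.Dict Int (List Int) × PySem.Set Int × List Int) i =>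
        let base := pvBase L i
        let cur := pvMerge base s.2.2.2
        let remaining := PySem.Set.diff s.2.2.1 (PySem.Set.ofList base)
        (s.1.insert i cur, s.2.1.insert i remaining, remaining, cur))
      (PySem.Dict.empty, PySem.Dict.empty,
        PySem.Set.diff (PySem.Set.ofList (PySem.List.pyRange 0 (L^2))) (PySem.Set.ofList [0]), []))
    = (⟨(PySem.List.pyRange 1 m).map (fun i => (i, pvAccB L (i-1).toNat))⟩,
       ⟨(PySem.List.pyRange 1 m).map (fun i => (i, pvRem L i.toNat))⟩,
       pvRem L (m-1).toNat,
       if m = 1 then [] else pvAccB L (m-2).toNat) := by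
  intro m hm
  induction m, hm using Int.le_induction with
  | base =>
    intro _
    rw [PySem.List.pyRange_one_eq_nil (le_refl 1)]
    simp [PySem.Dict.empty, pvRem]
  | succ m hm1 ih =>
    intro hub
    have hm2 : m ≤ 2*L-2 := by omega
    rw [PySem.List.pyRange_one_succ_right hm1, List.foldl_append, List.foldl_cons,
      List.foldl_nil, ih hm2]
    simp only []
    have hcur : pvMerge (pvBase L m) (if m = 1 then [] else pvAccB L (m-2).toNat)
        = pvAccB L (m-1).toNat := by
      by_cases h1 : m = 1
      · subst h1
        rw [if_pos rfl, pvMerge_nil_right]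
        norm_num
        rfl
      · rw [if_neg h1]
        have e2 : (m-1).toNat = (m-2).toNat + 1 := by omega
        have e3 : ((m-2).toNat : Int) + 2 = m := by omega
        rw [e2]
        conv_rhs => rw [pvAccB]
        rw [e3]
    have hrem : PySem.Set.diff (pvRem L (m-1).toNat) (PySem.Set.ofList (pvBase L m))
        = pvRem L m.toNat := by
      have e2 : m.toNat = (m-1).toNat + 1 := by omega
      have e3 : ((m-1).toNat : Int) + 1 = m := by omega
      rw [e2]
      conv_rhs => rw [pvRem]
      rw [e3]
    have hfreshB : ∀ (vs : Int → List Int),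
        (PySem.Dict.mk ((PySem.List.pyRange 1 m).map (fun i => (i, vs i)))).contains m
          = false := by
      intro vs
      rw [← Bool.not_eq_true, PySem.Dict.contains_iff_mem_keys]
      simp only [PySem.Dict.keys_mk, List.map_map, Function.comp_def]
      simp only [List.mem_map, PySem.List.mem_pyRange_one]
      rintro ⟨a, ⟨_, _⟩, rfl⟩
      omega
    rw [hcur, hrem]
    simp only [Prod.mk.injEq]
    have e4 : m + 1 - 2 = m - 1 := by ring
    have e5 : m + 1 - 1 = m := by ring
    rw [e4, e5]
    refine ⟨?_, ?_, rfl, by rw [if_neg (by omega)]⟩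
    · apply PySem.Dict.ext
      rw [PySem.Dict.items_insert_of_not_contains _ _ (hfreshB _)]
      simp
    · apply PySem.Dict.ext
      rw [PySem.Dict.items_insert_of_not_contains _ _ (hfreshB _)]
      simp

theorem ABC_eq (L : Int) : ABC L = ABC_alt L := by
  by_cases hL : 2 ≤ L
  · simp only [ABC, ABC_alt]
    rw [if_neg (by omega)]
    set B2 := (PySem.List.pyRange L (2*L-2)).foldl
      (fun B i => B.insert i ((PySem.List.pyRange 1 (2*L-i)).map (fun j => (i-L+1)*L + j*(L-1))))
      ((PySem.List.pyRange 1 L).foldl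
        (fun B i => B.insert i ((PySem.List.pyRange 0 (i+1)).map (fun j => i + j*(L-1))))
        PySem.Dict.empty) with hB2
    have hAB : B2.items = (PySem.List.pyRange 1 (2*L-2)).map (fun i => (i, pvBase L i)) :=
      stageAB L hL
    have hkeys2 : B2.keys = PySem.List.pyRange 1 (2*L-2) := by
      simp only [PySem.Dict.keys, hAB, List.map_map]
      simp [Function.comp_def]
    rw [hkeys2]
    have h3 := stage3 L hL B2 hAB (2*L-2) (by omega) (le_refl _)
    rw [PySem.List.pyRange_one_eq_nil (le_refl (2*L-2))] at h3
    simp only [List.map_nil, List.append_nil] at h3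
    set B3 := (PySem.List.pyRange 1 (2*L-2)).foldl
      (fun B i =>
        if i ≠ 1 then
          B.insert i (PySem.List.sorted (B.getD i [] ++ B.getD (i-1) []) (fun x => x))
        else B) B2 with hB3
    have h4 := stage4 L B3 h3
    have hAlt := altloop L (2*L-2) (by omega) (le_refl _)
    rw [hAlt, h4, h3]
    simp only [Prod.mk.injEq, true_and]
    constructor
    · apply List.map_congr_left
      intro i _
      rw [pvAccI, pvAccB_eq_accA L hL]
    · apply List.map_congr_left
      intro i hi
      have hi' := (PySem.List.mem_pyRange_one).mp hi
      rw [pvCA_eq_pvRem L i (by omega)]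
  · have h1 : PySem.List.pyRange 1 L = [] := PySem.List.pyRange_one_eq_nil (by omega)
    have h2 : PySem.List.pyRange L (2*L-2) = [] := PySem.List.pyRange_one_eq_nil (by omega)
    have h3 : PySem.List.pyRange 1 (2*L-2) = [] := PySem.List.pyRange_one_eq_nil (by omega)
    simp only [ABC, ABC_alt]
    rw [if_pos (by omega)]
    simp [h1, h2, h3, PySem.Dict.empty]

-- ===== VERDICT (by name: the statement is the Claim_ definition above) =====
theorem ABC_spec : Claim_equal_ABC := by
  intro L _
  show ABC L = ABC_alt L
  exact ABC_eq L
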